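-- pv_equiv track=rewrite | github.com/zhangir-azerbayev/ProofNet | informalization/docgen_export/example_parse.py | assemble_statement
-- ===== SOURCE A (Python) =====
-- def assemble_statement(kind, nm, binders, tp):
--     statement = kind + " " + nm
--     for binder in binders:
--         sc = statement + " " + binder
--         if len(sc[sc.rfind("\n")+1:]) > 80:
--             statement += "\n\t" + binder
--         else:
--             statement += " " + binder
--
--     statement += " :\n\t" + tp
--
--     return statement
-- ===== SOURCE B (Python) =====
-- # Two-phase build-then-render: a single pass grows a LIST OF LINES with a running
-- # last-line-length counter (no rfind over the ever-growing statement), then the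
-- # lines are joined once at the end.
--
-- def _tail_len(s):
--     # length of the text after the last newline of s (= len(s) if s has none)
--     return len(s) - s.rfind("\n") - 1
--
-- def assemble_statement(kind, nm, binders, tp):
--     lines = [kind + " " + nm]
--     cur = _tail_len(lines[0])
--     for b in binders:
--         if "\n" in b:
--             cand = newcur = _tail_len(b)
--         else:
--             cand = cur + 1 + len(b)
--             newcur = 1 + len(b)
--         if cand > 80:
--             lines.append("\t" + b)
--             cur = newcur
--         else:
--             lines[-1] += " " + b
--             cur = cand
--     return "\n".join(lines) + " :\n\t" + tp
-- ===== Notes on version B (the rewrite author's own statement) =====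
-- stated objective: faster
-- what changed: Replaces A's single fold that rescans the whole growing statement with rfind at every binder by a two-phase build-then-render: phase 1 groups binders into lines with a running last-line-length counter, phase 2 renders the group list.
import Mathlib
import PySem

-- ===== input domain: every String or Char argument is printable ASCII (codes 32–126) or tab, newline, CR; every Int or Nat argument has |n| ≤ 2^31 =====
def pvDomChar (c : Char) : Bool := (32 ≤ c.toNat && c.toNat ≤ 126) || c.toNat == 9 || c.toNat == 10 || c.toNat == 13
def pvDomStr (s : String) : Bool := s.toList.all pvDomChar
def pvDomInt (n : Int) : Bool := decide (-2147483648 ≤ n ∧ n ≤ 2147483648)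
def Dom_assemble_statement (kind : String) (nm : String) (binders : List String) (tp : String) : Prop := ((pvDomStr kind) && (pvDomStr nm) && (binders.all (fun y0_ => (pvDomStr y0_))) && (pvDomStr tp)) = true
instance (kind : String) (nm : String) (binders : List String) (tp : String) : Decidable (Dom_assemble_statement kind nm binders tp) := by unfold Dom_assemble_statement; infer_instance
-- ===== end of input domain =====

-- B replaces A's per-binder rfind scan of the growing statement by a build-then-render pass
-- over a list of lines with a running last-line-length counter (objective: faster).

-- ===== PORT A =====
-- one loop iteration: sc = statement + " " + binder; wrap if the last line of sc exceeds 80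
def pvAStep (stmt : List Char) (b : List Char) : List Char :=
  let sc := stmt ++ ' ' :: b
  if 80 < (PySem.List.slice sc (some (PySem.Chars.rfind sc ['\n'] + 1)) none).length then
    stmt ++ '\n' :: '\t' :: b
  else
    stmt ++ ' ' :: b

def assemble_statement (kind : String) (nm : String) (binders : List String) (tp : String) : String :=
  String.ofList (((binders.map String.toList).foldl pvAStep (kind.toList ++ ' ' :: nm.toList))
    ++ (' ' :: ':' :: '\n' :: '\t' :: tp.toList))

-- ===== PORT B =====
-- _tail_len(s) = len(s) - s.rfind("\n") - 1
def pvTailLen (s : List Char) : Int := (s.length : Int) - PySem.Chars.rfind s ['\n'] - 1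

-- one loop iteration of Source B; st.1 holds the lines in reverse (python appends at the end)
def pvBStep (st : List (List Char) × Int) (b : List Char) : List (List Char) × Int :=
  let cn : Int × Int :=
    if PySem.Chars.isIn ['\n'] b then (pvTailLen b, pvTailLen b)
    else (st.2 + 1 + (b.length : Int), 1 + (b.length : Int))
  if 80 < cn.1 then (('\t' :: b) :: st.1, cn.2)
  else ((match st.1 with
         | [] => [' ' :: b]          -- unreachable: lines starts nonempty and never shrinks
         | l :: rest => (l ++ ' ' :: b) :: rest), cn.1)

def assemble_statement_alt (kind : String) (nm : String) (binders : List String) (tp : String) : String :=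
  let head := kind.toList ++ ' ' :: nm.toList
  let st := (binders.map String.toList).foldl pvBStep ([head], pvTailLen head)
  String.ofList (PySem.Chars.join ['\n'] st.1.reverse ++ (' ' :: ':' :: '\n' :: '\t' :: tp.toList))

-- ===== PRECONDITION & SPEC =====
def Spec_assemble_statement (kind : String) (nm : String) (binders : List String) (tp : String) (out : String) : Prop := out = assemble_statement_alt kind nm binders tp
instance (kind : String) (nm : String) (binders : List String) (tp : String) (out : String) : Decidable (Spec_assemble_statement kind nm binders tp out) := by unfold Spec_assemble_statement; infer_instance

-- ===== CLAIM (what is proved, stated in full; the proofs are below) =====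
def Claim_equal_assemble_statement : Prop := ∀ (kind : String) (nm : String) (binders : List String) (tp : String), Dom_assemble_statement kind nm binders tp → Spec_assemble_statement kind nm binders tp (assemble_statement kind nm binders tp)

-- ===== LEMMAS AND PROOFS =====

-- length of the last line of cs (proof-only helper)
def pvL (cs : List Char) : Nat := (cs.reverse.takeWhile (fun c => c != '\n')).length
-- render B's reversed line list back to the statement (proof-only helper)
def pvR (rev : List (List Char)) : List Char := PySem.Chars.join ['\n'] rev.reverse

theorem go_zero (s : List Char) (sub : List Char) :
    PySem.Chars.rfind.go s sub 0 = if sub.isPrefixOf s then 0 else -1 := by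
  simp [PySem.Chars.rfind.go]

theorem go_succ (s : List Char) (sub : List Char) (j : Nat) :
    PySem.Chars.rfind.go s sub (j+1) =
      if sub.isPrefixOf (s.drop (j+1)) then ((j:Int)+1) else PySem.Chars.rfind.go s sub j := by
  rw [PySem.Chars.rfind.go]
  push_cast
  rfl

theorem prefNl (a : Char) (t : List Char) :
    (['\n'] : List Char).isPrefixOf (a :: t) = ('\n' == a) := by
  simp [List.isPrefixOf]

theorem go_append (xs : List Char) (c : Char) (k : Nat) (h : k < xs.length) :
    PySem.Chars.rfind.go (xs ++ [c]) ['\n'] k = PySem.Chars.rfind.go xs ['\n'] k := by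
  induction k with
  | zero =>
    obtain ⟨a, t, ht⟩ := List.exists_cons_of_ne_nil (List.ne_nil_of_length_pos h)
    rw [go_zero, go_zero, ht]
    simp [prefNl]
  | succ j ih =>
    rw [go_succ, go_succ]
    have hd : (xs ++ [c]).drop (j+1) = xs.drop (j+1) ++ [c] :=
      List.drop_append_of_le_length (by omega)
    obtain ⟨a, t, ht⟩ : ∃ a t, xs.drop (j+1) = a :: t := by
      have : xs.drop (j+1) ≠ [] := by
        simp [List.drop_eq_nil_iff]; omega
      exact List.exists_cons_of_ne_nil this
    rw [hd, ht]
    simp only [List.cons_append, prefNl]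
    rw [ih (by omega)]

theorem rfind_nl (cs : List Char) :
    PySem.Chars.rfind cs ['\n'] = (cs.length : Int) - 1 - (pvL cs : Int) := by
  induction cs using List.reverseRecOn with
  | nil => decide
  | append_singleton xs c ih =>
    have hL : PySem.Chars.rfind (xs ++ [c]) ['\n']
        = PySem.Chars.rfind.go (xs ++ [c]) ['\n'] (xs.length + 1) := by
      simp [PySem.Chars.rfind]
    rw [hL, go_succ]
    have h1 : (xs ++ [c]).drop (xs.length + 1) = [] := by
      simp
    rw [h1]
    simp only [List.isPrefixOf]
    have hdropL : (xs ++ [c]).drop xs.length = [c] := by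
      simp
    by_cases hc : c = '\n'
    · subst hc
      have hpv : pvL (xs ++ ['\n']) = 0 := by
        simp [pvL, List.takeWhile]
      rw [hpv]
      cases xs with
      | nil => simp [go_zero]
      | cons x xt =>
        have : x :: xt ≠ [] := by simp
        rw [show (x :: xt).length = xt.length + 1 from rfl, go_succ]
        have : ((x :: xt) ++ ['\n']).drop (xt.length + 1) = ['\n'] := by
          simpa using hdropL
        rw [this]
        simp
    · have hpv : pvL (xs ++ [c]) = 1 + pvL xs := by
        simp [pvL, List.takeWhile, hc]
        omega
      rw [hpv]
      cases xs with
      | nil =>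
        simp only [List.nil_append, List.length_nil]
        rw [go_zero]
        simp [prefNl, Ne.symm hc, pvL]
      | cons x xt =>
        rw [show (x :: xt).length = xt.length + 1 from rfl, go_succ]
        have hgd : ((x :: xt) ++ [c]).drop (xt.length + 1) = [c] := by
          simpa using hdropL
        rw [hgd, prefNl]
        have hcc : ('\n' == c) = false := by simp [Ne.symm hc]
        rw [hcc]
        simp only [Bool.false_eq_true, if_false]
        rw [go_append _ _ _ (by simp)]
        have ihe : PySem.Chars.rfind (x :: xt) ['\n']
            = PySem.Chars.rfind.go (x :: xt) ['\n'] (xt.length + 1) := by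
          simp [PySem.Chars.rfind]
        rw [ihe, go_succ] at ih
        have hnil : (x :: xt).drop (xt.length + 1) = [] := by
          simp [List.drop_eq_nil_iff]
        rw [hnil] at ih
        simp only [List.isPrefixOf, Bool.false_eq_true, if_false] at ih
        rw [ih]
        simp only [List.length_append, List.length_cons, List.length_nil]
        push_cast
        omega

theorem pvL_le (cs : List Char) : pvL cs ≤ cs.length := by
  have := (List.takeWhile_prefix (l := cs.reverse) (p := fun c => c != '\n')).length_le
  simpa [pvL] using this

theorem tailLen_eq (cs : List Char) : pvTailLen cs = (pvL cs : Int) := by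
  simp [pvTailLen, rfind_nl]; ring

theorem slice_len (sc : List Char) :
    (PySem.List.slice sc (some (PySem.Chars.rfind sc ['\n'] + 1)) none).length = pvL sc := by
  have hle := pvL_le sc
  rw [rfind_nl]
  have h0 : (0:Int) ≤ (sc.length : Int) - 1 - (pvL sc : Int) + 1 := by push_cast; omega
  rw [PySem.List.slice_from _ h0]
  simp only [List.length_drop]
  have : ((sc.length : Int) - 1 - (pvL sc : Int) + 1).toNat = sc.length - pvL sc := by omega
  rw [this]; omega

theorem pvL_append (xs ys : List Char) :
    pvL (xs ++ ys) = if '\n' ∈ ys then pvL ys else ys.length + pvL xs := by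
  simp only [pvL, List.reverse_append, List.takeWhile_append]
  by_cases h : '\n' ∈ ys
  · have hne : (ys.reverse.takeWhile (fun c => c != '\n')).length ≠ ys.reverse.length := by
      intro hlen
      have := List.takeWhile_eq_self_iff.mp
        ((List.takeWhile_prefix _).eq_of_length hlen)
      have := this '\n' (by simpa using h)
      simp at this
    rw [if_neg hne]
    simp [h]
  · have hall : ys.reverse.takeWhile (fun c => c != '\n') = ys.reverse :=
      List.takeWhile_eq_self_iff.mpr (by intro a ha; simp at ha ⊢; rintro rfl; exact h ha)
    simp [hall, h]
theorem hasNl_iff (b : List Char) : PySem.Chars.isIn ['\n'] b = true ↔ '\n' ∈ b := by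
  rw [PySem.Chars.isIn_iff_infix]
  constructor
  · intro h; exact h.mem (by simp)
  · intro h
    obtain ⟨s, t, rfl⟩ := List.append_of_mem h
    exact ⟨s, t, by simp⟩

theorem join_snoc (ls : List (List Char)) (l : List Char) (h : ls ≠ []) :
    PySem.Chars.join ['\n'] (ls ++ [l]) = PySem.Chars.join ['\n'] ls ++ '\n' :: l := by
  induction ls with
  | nil => simp at h
  | cons x xt ih =>
    cases xt with
    | nil => simp [PySem.Chars.join_cons_cons, PySem.Chars.join_singleton]
    | cons y yt =>
      have ih' := ih (by simp)
      rw [List.cons_append] at ih'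
      rw [List.cons_append, List.cons_append, PySem.Chars.join_cons_cons, ih']
      simp [PySem.Chars.join_cons_cons]

theorem join_mod (ls : List (List Char)) (l m : List Char) :
    PySem.Chars.join ['\n'] (ls ++ [l ++ m]) = PySem.Chars.join ['\n'] (ls ++ [l]) ++ m := by
  cases ls with
  | nil => simp [PySem.Chars.join_singleton]
  | cons x xt =>
    rw [join_snoc _ _ (by simp), join_snoc _ _ (by simp)]
    simp

-- last-line length of the statement after appending " " + b
theorem pvL_space (R b : List Char) :
    pvL (R ++ ' ' :: b) = if '\n' ∈ b then pvL b else 1 + b.length + pvL R := by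
  rw [pvL_append]
  by_cases h : '\n' ∈ b
  · rw [if_pos (by simp [h]), if_pos h]
    rw [show (' ' :: b) = [' '] ++ b from rfl, pvL_append, if_pos h]
  · rw [if_neg (by simp [h]), if_neg h]
    simp; omega
theorem pvL_wrap (R b : List Char) :
    pvL (R ++ '\n' :: '\t' :: b) = if '\n' ∈ b then pvL b else 1 + b.length := by
  rw [pvL_append, if_pos (by simp)]
  rw [show ('\n' :: '\t' :: b) = ['\n'] ++ '\t' :: b from rfl, pvL_append]
  by_cases h : '\n' ∈ b
  · rw [if_pos (by simp [h]), if_pos h]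
    rw [show ('\t' :: b) = ['\t'] ++ b from rfl, pvL_append, if_pos h]
  · rw [if_neg (by simp [h]), if_neg h]
    simp [pvL]; omega

theorem main_inv (bs : List (List Char)) :
    ∀ (rev : List (List Char)), rev ≠ [] → ∀ (cur : Int), cur = (pvL (pvR rev) : Int) →
    bs.foldl pvAStep (pvR rev) = pvR ((bs.foldl pvBStep (rev, cur)).1) := by
  induction bs with
  | nil => intro rev _ cur _; rfl
  | cons b bs ih =>
    intro rev hne cur hcur
    simp only [List.foldl_cons]
    by_cases hnl : '\n' ∈ b
    · have hin : PySem.Chars.isIn ['\n'] b = true := (hasNl_iff b).mpr hnl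
      have hA : pvL (pvR rev ++ ' ' :: b) = pvL b := by rw [pvL_space, if_pos hnl]
      by_cases hw : 80 < pvL b
      · have hAstep : pvAStep (pvR rev) b = pvR rev ++ '\n' :: '\t' :: b := by
          rw [pvAStep]; simp only [slice_len, hA]; rw [if_pos hw]
        have hw' : (80:Int) < (pvL b : Int) := by exact_mod_cast hw
        have hBstep : pvBStep (rev, cur) b = (('\t' :: b) :: rev, (pvL b : Int)) := by
          simp [pvBStep, hin, tailLen_eq, hw']
        have hRn : pvR (('\t' :: b) :: rev) = pvR rev ++ '\n' :: '\t' :: b := by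
          simp only [pvR, List.reverse_cons]
          rw [join_snoc _ _ (by simp [hne])]
        rw [hAstep, hBstep, ← hRn]
        exact ih _ (by simp) _ (by rw [hRn, pvL_wrap, if_pos hnl])
      · have hAstep : pvAStep (pvR rev) b = pvR rev ++ ' ' :: b := by
          rw [pvAStep]; simp only [slice_len, hA]; rw [if_neg hw]
        obtain ⟨l, rest, rfl⟩ := List.exists_cons_of_ne_nil hne
        have hw' : ¬((80:Int) < (pvL b : Int)) := by exact_mod_cast hw
        have hBstep : pvBStep (l :: rest, cur) b = ((l ++ ' ' :: b) :: rest, (pvL b : Int)) := by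
          simp [pvBStep, hin, tailLen_eq, hw']
        have hRn : pvR ((l ++ ' ' :: b) :: rest) = pvR (l :: rest) ++ ' ' :: b := by
          simp only [pvR, List.reverse_cons]
          exact join_mod _ _ _
        rw [hAstep, hBstep, ← hRn]
        exact ih _ (by simp) _ (by rw [hRn, pvL_space, if_pos hnl])
    · have hin : PySem.Chars.isIn ['\n'] b = false := by
        cases hh : PySem.Chars.isIn ['\n'] b
        · rfl
        · exact absurd ((hasNl_iff b).mp hh) hnl
      have hA : pvL (pvR rev ++ ' ' :: b) = 1 + b.length + pvL (pvR rev) := by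
        rw [pvL_space, if_neg hnl]
      by_cases hw : 80 < 1 + b.length + pvL (pvR rev)
      · have hAstep : pvAStep (pvR rev) b = pvR rev ++ '\n' :: '\t' :: b := by
          rw [pvAStep]; simp only [slice_len, hA]; rw [if_pos hw]
        have hw' : (80:Int) < cur + 1 + (b.length : Int) := by rw [hcur]; push_cast; omega
        have hBstep : pvBStep (rev, cur) b = (('\t' :: b) :: rev, 1 + (b.length : Int)) := by
          simp [pvBStep, hin, hw']
        have hRn : pvR (('\t' :: b) :: rev) = pvR rev ++ '\n' :: '\t' :: b := by
          simp only [pvR, List.reverse_cons]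
          rw [join_snoc _ _ (by simp [hne])]
        rw [hAstep, hBstep, ← hRn]
        exact ih _ (by simp) _ (by rw [hRn, pvL_wrap, if_neg hnl]; push_cast; ring)
      · have hAstep : pvAStep (pvR rev) b = pvR rev ++ ' ' :: b := by
          rw [pvAStep]; simp only [slice_len, hA]; rw [if_neg hw]
        obtain ⟨l, rest, rfl⟩ := List.exists_cons_of_ne_nil hne
        have hw' : ¬((80:Int) < cur + 1 + (b.length : Int)) := by rw [hcur]; push_cast; omega
        have hBstep : pvBStep (l :: rest, cur) b
            = ((l ++ ' ' :: b) :: rest, cur + 1 + (b.length : Int)) := by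
          simp [pvBStep, hin, hw']
        have hRn : pvR ((l ++ ' ' :: b) :: rest) = pvR (l :: rest) ++ ' ' :: b := by
          simp only [pvR, List.reverse_cons]
          exact join_mod _ _ _
        rw [hAstep, hBstep, ← hRn]
        exact ih _ (by simp) _ (by rw [hRn, pvL_space, if_neg hnl, hcur]; push_cast; ring)

-- ===== VERDICT (by name: the statement is the Claim_ definition above) =====
theorem assemble_statement_spec : Claim_equal_assemble_statement := by
  intro kind nm binders tp _
  unfold Spec_assemble_statement assemble_statement assemble_statement_alt
  have h1 : pvR [kind.toList ++ ' ' :: nm.toList] = kind.toList ++ ' ' :: nm.toList := by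
    simp [pvR, PySem.Chars.join_singleton]
  have h := main_inv (binders.map String.toList) [kind.toList ++ ' ' :: nm.toList]
    (by simp) (pvTailLen (kind.toList ++ ' ' :: nm.toList)) (by rw [tailLen_eq, h1])
  rw [h1] at h
  rw [h]
  rfl
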